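-- pv_equiv track=rewrite | github.com/Pilar-33/Parciales_Resueltos | parcial/ejercicio1/paquetes/funciones.py | articulos_por_deposito
-- ===== SOURCE A (Python) =====
-- def articulos_por_deposito(existencias: list, tipo_articulos: list) -> list:
--     resultados = []
--
--     for tipo in tipo_articulos:
--         max_cantidad = 0
--         provincia_max = ""
--
--         for existencia in existencias:
--             if existencia[1] == tipo:
--                 if existencia[2] > max_cantidad:
--                     max_cantidad = existencia[2]
--                     provincia_max = existencia[0]
--
--         # Guardar el resultado en la lista
--         resultados += [[provincia_max, tipo, max_cantidad]]
--     return resultados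
-- ===== SOURCE B (Python) =====
-- def articulos_por_deposito(existencias: list, tipo_articulos: list) -> list:
--     # one pass over existencias: tipo -> (max_cantidad, provincia_max)
--     best = {}
--     for provincia, tipo, cantidad in existencias:
--         if cantidad > best.get(tipo, (0, ""))[0]:
--             best[tipo] = (cantidad, provincia)
--     return [[best.get(tipo, (0, ""))[1], tipo, best.get(tipo, (0, ""))[0]]
--             for tipo in tipo_articulos]
-- ===== Notes on version B (the rewrite author's own statement) =====
-- stated objective: faster
-- what changed: Replaces the per-type rescan of existencias by one pass building a dict tipo->(max,provincia), then emits one lookup per type.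
import Mathlib
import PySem

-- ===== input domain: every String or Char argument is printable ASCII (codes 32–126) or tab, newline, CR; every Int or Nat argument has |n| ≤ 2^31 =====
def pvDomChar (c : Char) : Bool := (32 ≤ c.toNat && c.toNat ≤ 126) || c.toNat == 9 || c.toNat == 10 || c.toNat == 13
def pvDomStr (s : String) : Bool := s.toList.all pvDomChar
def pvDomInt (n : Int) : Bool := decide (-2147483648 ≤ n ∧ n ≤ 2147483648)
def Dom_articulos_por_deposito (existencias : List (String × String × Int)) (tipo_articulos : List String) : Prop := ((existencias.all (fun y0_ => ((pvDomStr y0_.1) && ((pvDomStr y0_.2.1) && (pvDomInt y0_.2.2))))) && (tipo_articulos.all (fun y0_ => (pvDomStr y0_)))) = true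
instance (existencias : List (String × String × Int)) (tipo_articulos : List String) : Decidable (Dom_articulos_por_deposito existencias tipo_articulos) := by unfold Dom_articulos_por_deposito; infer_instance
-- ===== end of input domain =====

-- B replaces A's per-type rescan of existencias by one pass building a dict tipo -> (max, provincia); objective: faster (O(E+T) vs O(T*E)).

-- ===== PORT A =====
def articulos_por_deposito (existencias : List (String × String × Int)) (tipo_articulos : List String) : List (String × String × Int) :=
  tipo_articulos.foldl (fun resultados tipo =>
    let st := existencias.foldl (fun (s : Int × String) existencia =>
      if existencia.2.1 = tipo then
        if existencia.2.2 > s.1 then (existencia.2.2, existencia.1) else s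
      else s) (0, "")
    resultados ++ [(st.2, tipo, st.1)]) []

-- ===== PORT B =====
-- one pass: best[tipo] = (max_cantidad, provincia_max)
def apd_best (existencias : List (String × String × Int)) : PySem.Dict String (Int × String) :=
  existencias.foldl (fun best e =>
    if e.2.2 > (best.getD e.2.1 (0, "")).1 then best.insert e.2.1 (e.2.2, e.1) else best)
    PySem.Dict.empty

def articulos_por_deposito_alt (existencias : List (String × String × Int)) (tipo_articulos : List String) : List (String × String × Int) :=
  let best := apd_best existencias
  tipo_articulos.map (fun tipo => ((best.getD tipo (0, "")).2, tipo, (best.getD tipo (0, "")).1))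

-- ===== PRECONDITION & SPEC =====
def Spec_articulos_por_deposito (existencias : List (String × String × Int)) (tipo_articulos : List String) (out : List (String × String × Int)) : Prop := out = articulos_por_deposito_alt existencias tipo_articulos
instance (existencias : List (String × String × Int)) (tipo_articulos : List String) (out : List (String × String × Int)) : Decidable (Spec_articulos_por_deposito existencias tipo_articulos out) := by unfold Spec_articulos_por_deposito; infer_instance

-- ===== CLAIM (what is proved, stated in full; the proofs are below) =====
def Claim_equal_articulos_por_deposito : Prop := ∀ (existencias : List (String × String × Int)) (tipo_articulos : List String), Dom_articulos_por_deposito existencias tipo_articulos → Spec_articulos_por_deposito existencias tipo_articulos (articulos_por_deposito existencias tipo_articulos)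

-- ===== LEMMAS AND PROOFS =====

-- the dict entry for `tipo` after B's pass equals A's inner fold for `tipo`
theorem apd_best_getD (existencias : List (String × String × Int)) (tipo : String)
    (d : PySem.Dict String (Int × String)) :
    ((existencias.foldl (fun best e =>
        if e.2.2 > (best.getD e.2.1 (0, "")).1 then best.insert e.2.1 (e.2.2, e.1) else best) d).getD tipo (0, ""))
    = existencias.foldl (fun (s : Int × String) existencia =>
        if existencia.2.1 = tipo then
          if existencia.2.2 > s.1 then (existencia.2.2, existencia.1) else s
        else s) (d.getD tipo (0, "")) := by
  induction existencias generalizing d with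
  | nil => rfl
  | cons e rest ih =>
    simp only [List.foldl_cons]
    rw [ih]
    congr 1
    by_cases h : e.2.1 = tipo
    · subst h
      by_cases hc : e.2.2 > (d.getD e.2.1 (0, "")).1 <;>
        simp [hc]
    · by_cases hc : e.2.2 > (d.getD e.2.1 (0, "")).1 <;>
        simp [hc, h, PySem.Dict.getD_insert, Ne.symm h]

-- ===== VERDICT (by name: the statement is the Claim_ definition above) =====
theorem articulos_por_deposito_spec : Claim_equal_articulos_por_deposito := by
  intro existencias tipo_articulos _
  unfold Spec_articulos_por_deposito articulos_por_deposito articulos_por_deposito_alt apd_best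
  rw [PySem.List.foldl_append_singleton_eq_map]
  simp only [List.nil_append]
  apply List.map_congr_left
  intro tipo _
  rw [apd_best_getD]
  rfl
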